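-- pv_equiv track=rewrite | github.com/Anekjain/Programming-Solution | misc/Hartals.py | hartalCount
-- ===== SOURCE A (Python) =====
-- def hartalCount(p,d):
--     hartal_days = []
--     for j in p:
--         for i in range(d):
--             i += 1
--             if(i % j == 0 ):
--                 hartal_days.append(i)
--                 if(i%7 == 6 or i%7 == 0): #REMOVING HARTALS ON SATURDAY AND SUNDAY
--                     hartal_days.pop()
--
--     #REMOVING DUPLICATES OF MULTIPLES [ex: 2,3 both have multiple 6]
--     hartal_days = list(dict.fromkeys(hartal_days))
--     return hartal_days
-- ===== SOURCE B (Python) =====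
-- def hartalCount(p, d):
--     # Iterate only the multiples of each party's period instead of scanning all d days.
--     seen = set()
--     out = []
--     for j in p:
--         step = abs(j)
--         for i in range(step, d + 1, step):
--             if i % 7 != 6 and i % 7 != 0 and i not in seen:
--                 seen.add(i)
--                 out.append(i)
--     return out
-- ===== Notes on version B (the rewrite author's own statement) =====
-- stated objective: faster
-- what changed: Instead of scanning every day 1..d for every party and testing divisibility, B iterates only the multiples of each party's period via range(step, d+1, step) and dedups on the fly with a seen-set, removing the final dict.fromkeys pass.
-- outside the precondition, e.g. on hartalCount([0], 0): A returns [], B raises ValueError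
import Mathlib
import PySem

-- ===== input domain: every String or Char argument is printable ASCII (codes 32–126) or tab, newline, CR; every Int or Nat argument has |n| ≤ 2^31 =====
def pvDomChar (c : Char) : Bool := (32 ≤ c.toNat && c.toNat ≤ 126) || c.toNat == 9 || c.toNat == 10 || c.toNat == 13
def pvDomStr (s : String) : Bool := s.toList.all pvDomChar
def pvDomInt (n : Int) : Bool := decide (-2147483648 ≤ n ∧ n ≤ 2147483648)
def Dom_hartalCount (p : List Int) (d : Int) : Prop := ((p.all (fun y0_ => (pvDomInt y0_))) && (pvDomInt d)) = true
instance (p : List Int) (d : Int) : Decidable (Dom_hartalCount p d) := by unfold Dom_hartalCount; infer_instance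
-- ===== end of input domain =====

-- B enumerates only the multiples of each party's period (range(step, d+1, step)) and dedups on the fly
-- with a seen-set, instead of A's scan of every day per party followed by a dict.fromkeys pass.

-- ===== PORT A =====
def hartalCount (p : List Int) (d : Int) : List Int :=
  let hartal_days : List Int := p.foldl (fun acc j =>
    (PySem.List.pyRange 0 d 1).foldl (fun acc i' =>
      let i := i' + 1
      if PySem.Int.mod i j == 0 then
        let acc' := acc ++ [i]
        -- append, then the conditional .pop() of the just-appended element = dropLast
        if PySem.Int.mod i 7 == 6 || PySem.Int.mod i 7 == 0 then acc'.dropLast else acc'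
      else acc) acc) []
  PySem.List.dedup hartal_days

-- ===== PORT B =====
def hartalCount_alt (p : List Int) (d : Int) : List Int :=
  (p.foldl (fun (st : PySem.Set Int × List Int) j =>
    let step : Int := |j|
    (PySem.List.pyRange step (d + 1) step).foldl (fun st i =>
      if !(PySem.Int.mod i 7 == 6) && !(PySem.Int.mod i 7 == 0) && !(PySem.Set.contains st.1 i) then
        (PySem.Set.add st.1 i, st.2 ++ [i])
      else st) st) (PySem.Set.empty, [])).2

-- ===== PRECONDITION & SPEC =====
-- Pre_ excludes inputs containing a zero period: for d >= 1 Python A raises ZeroDivisionError there ('i % 0'),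
-- and for d <= 0 A's empty day loop returns [] while B's own range(0, d+1, 0) raises ValueError.
def Pre_hartalCount (p : List Int) (d : Int) : Prop := ∀ j ∈ p, j ≠ 0
instance (p : List Int) (d : Int) : Decidable (Pre_hartalCount p d) := by unfold Pre_hartalCount; infer_instance
def pvWitness_hartalCount : List Int × Int := ([2, 3, -4], 20)

def Spec_hartalCount (p : List Int) (d : Int) (out : List Int) : Prop := out = hartalCount_alt p d
instance (p : List Int) (d : Int) (out : List Int) : Decidable (Spec_hartalCount p d out) := by unfold Spec_hartalCount; infer_instance

-- ===== CLAIM (what is proved, stated in full; the proofs are below) =====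
def Claim_equal_hartalCount : Prop := ∀ (p : List Int) (d : Int), Dom_hartalCount p d → Pre_hartalCount p d → Spec_hartalCount p d (hartalCount p d)

-- ===== LEMMAS AND PROOFS =====

-- the weekday test shared by both programs
def pvOkDay (i : Int) : Bool := !(PySem.Int.mod i 7 == 6) && !(PySem.Int.mod i 7 == 0)

-- '(i % j == 0)' is divisibility by |j|
lemma pv_mod_eq_abs_dvd (i j : Int) : (PySem.Int.mod i j == 0) = decide (|j| ∣ i) := by
  by_cases h : j ∣ i
  · simp [PySem.Int.mod_eq_zero_iff_dvd, h, (abs_dvd j i).mpr h]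
  · simp [PySem.Int.mod_eq_zero_iff_dvd, h]

-- A's inner day scan appends the filtered days
lemma pv_A_inner (j d : Int) (acc : List Int) :
    (PySem.List.pyRange 0 d 1).foldl (fun acc i' =>
      let i := i' + 1
      if PySem.Int.mod i j == 0 then
        let acc' := acc ++ [i]
        if PySem.Int.mod i 7 == 6 || PySem.Int.mod i 7 == 0 then acc'.dropLast else acc'
      else acc) acc
    = acc ++ ((PySem.List.pyRange 0 d 1).map (fun k => k + 1)).filter
        (fun i => (PySem.Int.mod i j == 0) && pvOkDay i) := by
  have hbody : (fun (acc : List Int) (i' : Int) =>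
      let i := i' + 1
      if PySem.Int.mod i j == 0 then
        let acc' := acc ++ [i]
        if PySem.Int.mod i 7 == 6 || PySem.Int.mod i 7 == 0 then acc'.dropLast else acc'
      else acc)
      = fun acc i' =>
        if ((PySem.Int.mod (i' + 1) j == 0) && pvOkDay (i' + 1)) then acc ++ [i' + 1] else acc := by
    funext acc i'
    simp only [pvOkDay, List.dropLast_concat]
    split_ifs <;> simp_all
  rw [hbody]
  rw [PySem.List.foldl_append_if (fun i' => (PySem.Int.mod (i' + 1) j == 0) && pvOkDay (i' + 1))
        (fun i' => i' + 1) _ acc]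
  rw [List.filter_map]
  rfl

-- the multiples of s in 1..d, enumerated two ways
lemma pv_multiples (s d : Int) (hs : 0 < s) :
    ((PySem.List.pyRange 0 d 1).map (fun k => k + 1)).filter (fun i => decide (s ∣ i))
    = PySem.List.pyRange s (d + 1) s := by
  have hmemL : ∀ x : Int, x ∈ ((PySem.List.pyRange 0 d 1).map (fun k => k + 1)).filter (fun i => decide (s ∣ i))
      ↔ (1 ≤ x ∧ x < d + 1 ∧ s ∣ x) := by
    intro x
    simp only [List.mem_filter, List.mem_map, decide_eq_true_eq]
    constructor
    · rintro ⟨⟨k, hk, rfl⟩, hdvd⟩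
      rw [PySem.List.mem_pyRange_one] at hk
      exact ⟨by omega, by omega, hdvd⟩
    · rintro ⟨h1, h2, hdvd⟩
      exact ⟨⟨x - 1, by rw [PySem.List.mem_pyRange_one]; omega, by ring⟩, hdvd⟩
  have hmemR : ∀ x : Int, x ∈ PySem.List.pyRange s (d + 1) s ↔ (1 ≤ x ∧ x < d + 1 ∧ s ∣ x) := by
    intro x
    rw [PySem.List.mem_pyRange_iff_of_pos hs]
    constructor
    · rintro ⟨h1, h2, hdvd⟩
      have : s ∣ x := by simpa using dvd_add hdvd (dvd_refl s)
      exact ⟨by omega, h2, this⟩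
    · rintro ⟨h1, h2, hdvd⟩
      have hsx : s ≤ x := Int.le_of_dvd (by omega) hdvd
      exact ⟨hsx, h2, dvd_sub hdvd (dvd_refl s)⟩
  have hpwL : (((PySem.List.pyRange 0 d 1).map (fun k => k + 1)).filter (fun i => decide (s ∣ i))).Pairwise (· < ·) := by
    apply List.Pairwise.filter
    exact (PySem.List.pairwise_lt_pyRange_one 0 d).map _ (by intro a b h; omega)
  have hpwR : (PySem.List.pyRange s (d + 1) s).Pairwise (· < ·) := by
    rw [PySem.List.pyRange_of_pos s (d + 1) hs]
    apply List.Pairwise.map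
    · intro a b (h : a < b)
      have : (a : Int) < (b : Int) := by exact_mod_cast h
      nlinarith
    · exact List.pairwise_lt_range
  have hperm : (((PySem.List.pyRange 0 d 1).map (fun k => k + 1)).filter (fun i => decide (s ∣ i))).Perm
      (PySem.List.pyRange s (d + 1) s) := by
    rw [List.perm_ext_iff_of_nodup (hpwL.imp ne_of_lt) (hpwR.imp ne_of_lt)]
    intro x; rw [hmemL x, hmemR x]
  exact List.eq_of_perm_of_sorted (fun a b _ _ h1 h2 => absurd h2 (not_lt.mpr h1.le)) hpwL hpwR hperm

-- B's inner loop, started from an equal pair, keeps the pair equal and acts like a conditional Set.add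
lemma pv_B_inner (l : List Int) (s : PySem.Set Int) :
    l.foldl (fun (st : PySem.Set Int × List Int) i =>
      if !(PySem.Int.mod i 7 == 6) && !(PySem.Int.mod i 7 == 0) && !(PySem.Set.contains st.1 i) then
        (PySem.Set.add st.1 i, st.2 ++ [i])
      else st) (s, s)
    = (l.foldl (fun s i => if pvOkDay i then PySem.Set.add s i else s) s,
       l.foldl (fun s i => if pvOkDay i then PySem.Set.add s i else s) s) := by
  induction l generalizing s with
  | nil => rfl
  | cons x xs ih =>
    simp only [List.foldl_cons]
    have hstep : (if !(PySem.Int.mod x 7 == 6) && !(PySem.Int.mod x 7 == 0) && !(PySem.Set.contains s x) then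
        (PySem.Set.add s x, s ++ [x]) else ((s, s) : PySem.Set Int × List Int))
        = ((if pvOkDay x then PySem.Set.add s x else s), (if pvOkDay x then PySem.Set.add s x else s)) := by
      have hcond : (!(PySem.Int.mod x 7 == 6) && !(PySem.Int.mod x 7 == 0) && !(PySem.Set.contains s x))
          = (pvOkDay x && !(PySem.Set.contains s x)) := by
        simp [pvOkDay]
      rw [hcond]
      cases hok : pvOkDay x <;> cases hc : PySem.Set.contains s x <;>
        simp_all [PySem.Set.add, PySem.Set.contains]
    rw [hstep]
    split
    · exact ih _
    · exact ih _

-- folding Set.add over a flattened list = the nested fold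
lemma pv_foldl_flatMap (F : Int → List Int) (p : List Int) (s : PySem.Set Int) :
    (p.flatMap F).foldl PySem.Set.add s = p.foldl (fun s j => (F j).foldl PySem.Set.add s) s := by
  induction p generalizing s with
  | nil => rfl
  | cons x xs ih => simp [List.flatMap_cons, List.foldl_append, ih]

-- ===== VERDICT (by name: the statement is the Claim_ definition above) =====
theorem hartalCount_spec : Claim_equal_hartalCount := by
  intro p d _ hpre
  unfold Spec_hartalCount hartalCount hartalCount_alt
  -- A's flattened day list
  have hA : (p.foldl (fun acc j =>
      (PySem.List.pyRange 0 d 1).foldl (fun acc i' =>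
        let i := i' + 1
        if PySem.Int.mod i j == 0 then
          let acc' := acc ++ [i]
          if PySem.Int.mod i 7 == 6 || PySem.Int.mod i 7 == 0 then acc'.dropLast else acc'
        else acc) acc) ([] : List Int))
      = p.flatMap (fun j => ((PySem.List.pyRange 0 d 1).map (fun k => k + 1)).filter
          (fun i => (PySem.Int.mod i j == 0) && pvOkDay i)) := by
    rw [PySem.List.foldl_congr_mem p _ _ ([] : List Int) (fun acc j _ => pv_A_inner j d acc),
      PySem.List.foldl_append_eq_flatMap, List.nil_append]
  simp only [hA]
  -- B collapses to a fold of conditional Set.add over the per-party multiple ranges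
  have hB : ∀ q : List Int, (q.foldl (fun (st : PySem.Set Int × List Int) j =>
      let step : Int := |j|
      (PySem.List.pyRange step (d + 1) step).foldl (fun st i =>
        if !(PySem.Int.mod i 7 == 6) && !(PySem.Int.mod i 7 == 0) && !(PySem.Set.contains st.1 i) then
          (PySem.Set.add st.1 i, st.2 ++ [i])
        else st) st) ((PySem.Set.empty : PySem.Set Int), ([] : List Int))).2
      = q.foldl (fun s j =>
          (PySem.List.pyRange |j| (d + 1) |j|).foldl
            (fun s i => if pvOkDay i then PySem.Set.add s i else s) s) [] := by
    intro q
    have key : ∀ (q : List Int) (s : PySem.Set Int),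
        q.foldl (fun (st : PySem.Set Int × List Int) j =>
          (PySem.List.pyRange |j| (d + 1) |j|).foldl (fun st i =>
            if !(PySem.Int.mod i 7 == 6) && !(PySem.Int.mod i 7 == 0) && !(PySem.Set.contains st.1 i) then
              (PySem.Set.add st.1 i, st.2 ++ [i])
            else st) st) (s, s)
        = (q.foldl (fun s j =>
            (PySem.List.pyRange |j| (d + 1) |j|).foldl
              (fun s i => if pvOkDay i then PySem.Set.add s i else s) s) s,
           q.foldl (fun s j =>
            (PySem.List.pyRange |j| (d + 1) |j|).foldl
              (fun s i => if pvOkDay i then PySem.Set.add s i else s) s) s) := by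
      intro q
      induction q with
      | nil => intro s; rfl
      | cons x xs ih =>
        intro s
        simp only [List.foldl_cons]
        rw [pv_B_inner]
        exact ih _
    exact congrArg Prod.snd (key q PySem.Set.empty)
  rw [hB p]
  -- rewrite each side's per-party contribution and finish
  rw [PySem.List.dedup_eq_ofList, PySem.Set.ofList_eq_foldl, pv_foldl_flatMap]
  apply PySem.List.foldl_congr_mem
  intro acc j hj
  have hjne : j ≠ 0 := hpre j hj
  have hs : (0 : Int) < |j| := abs_pos.mpr hjne
  have hfilt : ((PySem.List.pyRange 0 d 1).map (fun k => k + 1)).filter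
      (fun i => (PySem.Int.mod i j == 0) && pvOkDay i)
      = (PySem.List.pyRange |j| (d + 1) |j|).filter pvOkDay := by
    have h1 : (fun i => (PySem.Int.mod i j == 0) && pvOkDay i)
        = (fun i => pvOkDay i && decide (|j| ∣ i)) := by
      funext i; rw [pv_mod_eq_abs_dvd, Bool.and_comm]
    rw [h1, ← List.filter_filter, pv_multiples |j| d hs]
  rw [hfilt, List.foldl_filter]
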